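-- pv_equiv track=rewrite | github.com/aldairwontroba/Predict_Pleno | utilitarios/extracao de dat/scan_replay.py | dump_varints
-- ===== SOURCE A (Python) =====
-- def read_uvarint(buf, i):
--     x = 0
--     s = 0
--     start = i
--     while i < len(buf):
--         b = buf[i]
--         i += 1
--         x |= (b & 0x7F) << s
--         if (b & 0x80) == 0:
--             return x, i, i-start
--         s += 7
--         if s > 63:
--             break
--     return None, start, 0
--
-- def zigzag_decode(n):
--     # int -> signed
--     return (n >> 1) ^ -(n & 1)
--
-- def dump_varints(buf, pos, count=12):
--     out=[]
--     i=pos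
--     for _ in range(count):
--         v, j, ln = read_uvarint(buf, i)
--         if ln == 0: break
--         out.append((i, ln, v, zigzag_decode(v)))
--         i = j
--     return out
-- ===== SOURCE B (Python) =====
-- def dump_varints(buf, pos, count=12):
--     # Two-stage decode per varint: scan forward for the terminator byte first,
--     # then accumulate the value back-to-front (high byte first), no shift counter.
--     out = []
--     i = pos
--     for _ in range(count):
--         j = i
--         while j < len(buf) and buf[j] & 0x80:
--             j += 1
--         if j >= len(buf) or j - i >= 10:
--             break   # unterminated varint, or too long to fit the 64-bit guard
--         x = 0
--         t = j
--         while t >= i: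
--             x = (x << 7) | (buf[t] & 0x7F)
--             t -= 1
--         out.append((i, j - i + 1, x, (x >> 1) ^ -(x & 1)))
--         i = j + 1
--     return out
-- ===== Notes on version B (the rewrite author's own statement) =====
-- stated objective: alternative
-- what changed: Instead of the single forward pass that accumulates x with a running shift counter s and an s>63 overflow break, B decodes each varint in two stages: first scan forward for the terminator byte, reject if it is missing or the varint spans 10+ bytes, then build the value back-to-front (high byte first) with x = (x<<7)|(b&0x7F) and no shift counter.
import Mathlib
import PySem

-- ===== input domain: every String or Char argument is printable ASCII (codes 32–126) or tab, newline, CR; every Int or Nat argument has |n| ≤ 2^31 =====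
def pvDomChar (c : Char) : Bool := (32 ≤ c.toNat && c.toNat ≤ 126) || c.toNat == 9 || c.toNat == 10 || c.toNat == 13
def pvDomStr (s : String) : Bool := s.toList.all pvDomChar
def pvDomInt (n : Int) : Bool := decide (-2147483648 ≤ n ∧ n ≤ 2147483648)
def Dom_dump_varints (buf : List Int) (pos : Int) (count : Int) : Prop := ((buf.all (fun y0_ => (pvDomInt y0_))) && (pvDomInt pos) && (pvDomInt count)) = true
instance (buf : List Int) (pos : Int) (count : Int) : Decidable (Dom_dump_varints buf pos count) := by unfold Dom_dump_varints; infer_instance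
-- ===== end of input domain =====

-- B decodes each varint in two stages — scan forward for the terminator byte, then build the
-- value back-to-front with no shift counter — instead of A's one forward pass with a running
-- shift s and an s>63 break; objective: an alternative algorithm, same return value.

-- ===== PORT A =====
-- the while-loop of read_uvarint; s increases by 7 each pass and the loop breaks past 63,
-- so (64 - s).toNat is a termination measure.  buf[i] is PySem.List.pyGet?; the .getD 0 is
-- never taken inside Pre_ (the loop only reads with -len ≤ i < len there).
def ruLoop (buf : List Int) (start : Int) (i : Int) (x : Int) (s : Int) :
    Option Int × Int × Int :=
  if i < (buf.length : Int) then
    -- b = buf[i]; i += 1; x |= (b & 0x7F) << s  (expressions inlined; s ≥ 0 throughout)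
    if PySem.Int.band ((PySem.List.pyGet? buf i).getD 0) 128 = 0 then
      (some (PySem.Int.bor x (PySem.Int.band ((PySem.List.pyGet? buf i).getD 0) 127 <<< s.toNat)),
       i + 1, i + 1 - start)
    else if s + 7 > 63 then (none, start, 0)
    else ruLoop buf start (i + 1)
      (PySem.Int.bor x (PySem.Int.band ((PySem.List.pyGet? buf i).getD 0) 127 <<< s.toNat)) (s + 7)
  else (none, start, 0)
termination_by (64 - s).toNat
decreasing_by omega

def read_uvarint (buf : List Int) (i : Int) : Option Int × Int × Int :=
  ruLoop buf i i 0 0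

def zigzag_decode (n : Int) : Int :=
  PySem.Int.bxor (n >>> 1) (-(PySem.Int.band n 1))   -- (n >> 1) ^ -(n & 1)

-- for _ in range(count): fuel = count.toNat (range of a negative count is empty)
def dvGo (buf : List Int) (out : List (Int × Int × Int × Int)) (i : Int) :
    Nat → List (Int × Int × Int × Int)
  | 0 => out
  | n + 1 =>
    let (v, j, ln) := read_uvarint buf i
    if ln = 0 then out
    else
      -- when ln ≠ 0, v = some x; .getD 0 only projects that value
      let x := v.getD 0
      dvGo buf (out ++ [(i, ln, x, zigzag_decode x)]) j n

def dump_varints (buf : List Int) (pos : Int) (count : Int) : List (Int × Int × Int × Int) :=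
  dvGo buf [] pos count.toNat

-- ===== PORT B =====
-- stage 1 of Source B: `j = i; while j < len(buf) and buf[j] & 0x80: j += 1`
def bScan (buf : List Int) (j : Int) : Int :=
  if j < (buf.length : Int) ∧ PySem.Int.band ((PySem.List.pyGet? buf j).getD 0) 128 ≠ 0 then
    bScan buf (j + 1)
  else j
termination_by ((buf.length : Int) - j).toNat
decreasing_by omega

-- stage 2 of Source B: `x = 0; t = j; while t >= i: x = (x << 7) | (buf[t] & 0x7F); t -= 1`
def bAcc (buf : List Int) (i : Int) (t : Int) (x : Int) : Int :=
  if i ≤ t then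
    bAcc buf i (t - 1)
      (PySem.Int.bor (x <<< (7 : Nat)) (PySem.Int.band ((PySem.List.pyGet? buf t).getD 0) 127))
  else x
termination_by (t - i + 1).toNat
decreasing_by omega

-- outer `for _ in range(count)` of Source B: fuel = count.toNat
def bGo (buf : List Int) (out : List (Int × Int × Int × Int)) (i : Int) :
    Nat → List (Int × Int × Int × Int)
  | 0 => out
  | n + 1 =>
    let j := bScan buf i
    if (buf.length : Int) ≤ j ∨ 10 ≤ j - i then out   -- unterminated, or 64-bit guard
    else
      let x := bAcc buf i j 0
      bGo buf (out ++ [(i, j - i + 1, x, PySem.Int.bxor (x >>> 1) (-(PySem.Int.band x 1)))])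
        (j + 1) n

def dump_varints_alt (buf : List Int) (pos : Int) (count : Int) : List (Int × Int × Int × Int) :=
  bGo buf [] pos count.toNat

-- ===== PRECONDITION & SPEC =====
-- A raises IndexError when the first read happens at an index below -len(buf)
-- (Python's negative indexing wraps only down to -len); Pre_ excludes exactly that.
def Pre_dump_varints (buf : List Int) (pos : Int) (count : Int) : Prop :=
  0 < count → -(buf.length : Int) ≤ pos
instance (buf : List Int) (pos : Int) (count : Int) : Decidable (Pre_dump_varints buf pos count) := by unfold Pre_dump_varints; infer_instance
def pvWitness_dump_varints : List Int × Int × Int := ([129, 3, 7], 0, 12)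

def Spec_dump_varints (buf : List Int) (pos : Int) (count : Int) (out : List (Int × Int × Int × Int)) : Prop := out = dump_varints_alt buf pos count
instance (buf : List Int) (pos : Int) (count : Int) (out : List (Int × Int × Int × Int)) : Decidable (Spec_dump_varints buf pos count out) := by unfold Spec_dump_varints; infer_instance

-- ===== CLAIM (what is proved, stated in full; the proofs are below) =====
def Claim_equal_dump_varints : Prop := ∀ (buf : List Int) (pos : Int) (count : Int), Dom_dump_varints buf pos count → Pre_dump_varints buf pos count → Spec_dump_varints buf pos count (dump_varints buf pos count)

-- ===== LEMMAS AND PROOFS =====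

-- b & 0x7F, the 7-bit payload of a byte (proof-side shorthand for the expression both ports use)
def pvByte (buf : List Int) (k : Int) : Int :=
  PySem.Int.band ((PySem.List.pyGet? buf k).getD 0) 127

-- little-endian value of the chunk of bytes i..e (reference value both ports are compared to)
def chunkVal (buf : List Int) (i e : Int) : Int :=
  if i < e then PySem.Int.bor (pvByte buf i) (chunkVal buf (i + 1) e <<< (7 : Nat))
  else pvByte buf i
termination_by (e - i).toNat
decreasing_by omega

theorem pvShiftCast (m n : Nat) : ((m : Int)) <<< n = ((m <<< n : Nat) : Int) := rfl

theorem pvShiftNonneg {a : Int} (ha : 0 ≤ a) (n : Nat) : 0 ≤ a <<< n := by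
  obtain ⟨a', rfl⟩ := Int.eq_ofNat_of_zero_le ha
  rw [pvShiftCast]; exact Int.natCast_nonneg _

theorem pvBorNonneg {a b : Int} (ha : 0 ≤ a) (hb : 0 ≤ b) : 0 ≤ PySem.Int.bor a b := by
  rw [PySem.Int.bor_of_nonneg ha hb]; exact Int.natCast_nonneg _

theorem pvBorAssoc {a b c : Int} (ha : 0 ≤ a) (hb : 0 ≤ b) (hc : 0 ≤ c) :
    PySem.Int.bor (PySem.Int.bor a b) c = PySem.Int.bor a (PySem.Int.bor b c) := by
  obtain ⟨a', rfl⟩ := Int.eq_ofNat_of_zero_le ha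
  obtain ⟨b', rfl⟩ := Int.eq_ofNat_of_zero_le hb
  obtain ⟨c', rfl⟩ := Int.eq_ofNat_of_zero_le hc
  simp [Nat.or_assoc]

theorem pvBorShift {a b : Int} (ha : 0 ≤ a) (hb : 0 ≤ b) (n : Nat) :
    (PySem.Int.bor a b) <<< n = PySem.Int.bor (a <<< n) (b <<< n) := by
  obtain ⟨a', rfl⟩ := Int.eq_ofNat_of_zero_le ha
  obtain ⟨b', rfl⟩ := Int.eq_ofNat_of_zero_le hb
  simp only [PySem.Int.bor_natCast, pvShiftCast, Nat.shiftLeft_or_distrib]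

theorem pvByte_nonneg (buf : List Int) (k : Int) : 0 ≤ pvByte buf k := by
  rw [pvByte, PySem.Int.band_comm]
  exact PySem.Int.band_nonneg_of_nonneg_left _ (by norm_num)

theorem pvByte_def (buf : List Int) (k : Int) :
    PySem.Int.band ((PySem.List.pyGet? buf k).getD 0) 127 = pvByte buf k := rfl

theorem chunkVal_nonneg (buf : List Int) (i e : Int) : 0 ≤ chunkVal buf i e := by
  fun_induction chunkVal buf i e with
  | case1 i h ih => exact pvBorNonneg (pvByte_nonneg _ _) (pvShiftNonneg ih 7)
  | case2 i h => exact pvByte_nonneg _ _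

theorem bScan_ge (buf : List Int) (j : Int) : j ≤ bScan buf j := by
  fun_induction bScan buf j <;> omega

-- peel the HIGH byte off chunkVal (the direction B's backward loop consumes)
theorem pvBorZeroLeft {c : Int} (hc : 0 ≤ c) : PySem.Int.bor 0 c = c := by
  rw [PySem.Int.bor_of_nonneg le_rfl hc]
  simp [Int.toNat_of_nonneg hc]

theorem chunkVal_peel (buf : List Int) : ∀ (k : Nat) (i t : Int), i ≤ t - 1 → (t - i).toNat = k →
    chunkVal buf i t =
      PySem.Int.bor (chunkVal buf i (t - 1)) (pvByte buf t <<< (7 * (t - i)).toNat) := by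
  intro k
  induction k with
  | zero => intro i t h hk; omega
  | succ k ih =>
    intro i t h hk
    by_cases h2 : i ≤ t - 1 - 1
    · rw [chunkVal, if_pos (by omega : i < t)]
      rw [ih (i + 1) t (by omega) (by omega)]
      rw [pvBorShift (chunkVal_nonneg _ _ _) (pvShiftNonneg (pvByte_nonneg _ _) _) 7]
      rw [show pvByte buf t <<< (7 * (t - (i + 1))).toNat <<< (7 : Nat)
            = pvByte buf t <<< ((7 * (t - (i + 1))).toNat + 7) from (Int.shiftLeft_add _ _ _).symm]
      rw [show (7 * (t - (i + 1))).toNat + 7 = (7 * (t - i)).toNat from by omega]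
      rw [← pvBorAssoc (pvByte_nonneg _ _) (pvShiftNonneg (chunkVal_nonneg _ _ _) 7)
            (pvShiftNonneg (pvByte_nonneg _ _) _)]
      conv_rhs => rw [chunkVal, if_pos (show i < t - 1 by omega)]
    · have hit : i = t - 1 := by omega
      subst hit
      rw [chunkVal, if_pos (by omega : t - 1 < t)]
      rw [show t - 1 + 1 = t from by ring]
      rw [show chunkVal buf t t = pvByte buf t from by rw [chunkVal, if_neg (lt_irrefl t)]]
      rw [show chunkVal buf (t - 1) (t - 1) = pvByte buf (t - 1) from by
            rw [chunkVal, if_neg (lt_irrefl (t - 1))]]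
      rw [show (7 * (t - (t - 1))).toNat = 7 from by omega]

-- B's backward accumulation computes x ≪ 7·len | chunkVal
theorem bAcc_char (buf : List Int) : ∀ (k : Nat) (t i x : Int), 0 ≤ x → (t - i + 1).toNat = k →
    bAcc buf i t x =
      if i ≤ t then PySem.Int.bor (x <<< (7 * (t - i + 1)).toNat) (chunkVal buf i t) else x := by
  intro k
  induction k with
  | zero =>
    intro t i x hx hk
    rw [bAcc, if_neg (by omega : ¬ i ≤ t), if_neg (by omega : ¬ i ≤ t)]
  | succ k ih =>
    intro t i x hx hk
    by_cases hit : i ≤ t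
    · rw [bAcc, if_pos hit, if_pos hit]
      simp only [pvByte_def]
      rw [ih (t - 1) i (PySem.Int.bor (x <<< (7 : Nat)) (pvByte buf t))
            (pvBorNonneg (pvShiftNonneg hx 7) (pvByte_nonneg _ _)) (by omega)]
      by_cases h2 : i ≤ t - 1
      · rw [if_pos h2]
        rw [pvBorShift (pvShiftNonneg hx 7) (pvByte_nonneg _ _)]
        rw [show x <<< (7 : Nat) <<< (7 * (t - 1 - i + 1)).toNat
              = x <<< (7 + (7 * (t - 1 - i + 1)).toNat) from (Int.shiftLeft_add _ _ _).symm]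
        rw [show 7 + (7 * (t - 1 - i + 1)).toNat = (7 * (t - i + 1)).toNat from by omega]
        rw [show (7 * (t - 1 - i + 1)).toNat = (7 * (t - i)).toNat from by omega]
        rw [pvBorAssoc (pvShiftNonneg hx _) (pvShiftNonneg (pvByte_nonneg _ _) _)
              (chunkVal_nonneg _ _ _)]
        rw [PySem.Int.bor_comm (pvByte buf t <<< (7 * (t - i)).toNat) (chunkVal buf i (t - 1))]
        rw [← chunkVal_peel buf (t - i).toNat i t h2 rfl]
      · rw [if_neg h2]
        have hti : i = t := by omega
        subst hti
        rw [show chunkVal buf i i = pvByte buf i from by rw [chunkVal, if_neg (lt_irrefl i)]]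
        rw [show (7 * (i - i + 1)).toNat = 7 from by omega]
    · rw [bAcc, if_neg hit, if_neg hit]

theorem bAcc_zero (buf : List Int) (i j : Int) (h : i ≤ j) :
    bAcc buf i j 0 = chunkVal buf i j := by
  rw [bAcc_char buf (j - i + 1).toNat j i 0 le_rfl rfl, if_pos h]
  rw [Int.zero_shiftLeft]
  exact pvBorZeroLeft (chunkVal_nonneg _ _ _)

-- A's forward loop characterised by the terminator position bScan and chunkVal
theorem ruLoop_char (buf : List Int) (start i x s : Int) :
    0 ≤ x → 0 ≤ s → s ≤ 63 →
    ruLoop buf start i x s =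
      (if bScan buf i < (buf.length : Int) ∧ 7 * (bScan buf i - i) + s ≤ 63 then
        (some (PySem.Int.bor x (chunkVal buf i (bScan buf i) <<< s.toNat)),
         bScan buf i + 1, bScan buf i + 1 - start)
      else (none, start, 0)) := by
  fun_induction ruLoop buf start i x s with
  | case1 i x s hlt hb =>
    intro hx hs0 hs
    rw [show bScan buf i = i from by rw [bScan, if_neg (by simp [hb])]]
    rw [if_pos ⟨hlt, by omega⟩]
    rw [show chunkVal buf i i = pvByte buf i from by rw [chunkVal, if_neg (lt_irrefl i)]]
    rw [pvByte]
  | case2 i x s hlt hb hov =>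
    intro hx hs0 hs
    have he : bScan buf i = bScan buf (i + 1) := by rw [bScan, if_pos ⟨hlt, hb⟩]
    have hge := bScan_ge buf (i + 1)
    rw [if_neg (by omega)]
  | case3 i x s hlt hb hov ih =>
    intro hx hs0 hs
    simp only [pvByte_def] at ih ⊢
    have he : bScan buf i = bScan buf (i + 1) := by rw [bScan, if_pos ⟨hlt, hb⟩]
    have hge := bScan_ge buf (i + 1)
    have hbn : 0 ≤ PySem.Int.band ((PySem.List.pyGet? buf i).getD 0) 127 := pvByte_nonneg buf i
    rw [ih (pvBorNonneg hx (pvShiftNonneg hbn _)) (by omega) (by omega)]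
    rw [he]
    by_cases hc : bScan buf (i + 1) < (buf.length : Int) ∧ 7 * (bScan buf (i + 1) - i) + s ≤ 63
    · rw [if_pos ⟨hc.1, by omega⟩, if_pos hc]
      have hilt : i < bScan buf (i + 1) := by omega
      rw [show chunkVal buf i (bScan buf (i + 1))
            = PySem.Int.bor (pvByte buf i) (chunkVal buf (i + 1) (bScan buf (i + 1)) <<< (7 : Nat))
            from by rw [chunkVal, if_pos hilt]]
      rw [pvBorShift (pvByte_nonneg _ _) (pvShiftNonneg (chunkVal_nonneg _ _ _) 7) s.toNat]
      rw [show chunkVal buf (i + 1) (bScan buf (i + 1)) <<< (7 : Nat) <<< s.toNat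
            = chunkVal buf (i + 1) (bScan buf (i + 1)) <<< (7 + s.toNat)
            from (Int.shiftLeft_add _ _ _).symm]
      rw [show 7 + s.toNat = (s + 7).toNat from by omega]
      rw [pvBorAssoc hx (pvShiftNonneg (pvByte_nonneg _ _) _)
            (pvShiftNonneg (chunkVal_nonneg _ _ _) _)]
    · rw [if_neg (by omega), if_neg hc]
  | case4 i x s hlt =>
    intro hx hs0 hs
    rw [show bScan buf i = i from by rw [bScan, if_neg (by simp [hlt])]]
    rw [if_neg (by omega)]

-- the two outer loops agree step for step
theorem dvGo_eq_bGo (buf : List Int) :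
    ∀ (n : Nat) (out : List (Int × Int × Int × Int)) (i : Int),
      dvGo buf out i n = bGo buf out i n := by
  intro n
  induction n with
  | zero => intro out i; rfl
  | succ n ih =>
    intro out i
    have hrc := ruLoop_char buf i i 0 0 le_rfl le_rfl (by norm_num)
    have hge := bScan_ge buf i
    by_cases hc : bScan buf i < (buf.length : Int) ∧ 7 * (bScan buf i - i) + 0 ≤ 63
    · rw [if_pos hc] at hrc
      have hx0 : PySem.Int.bor 0 (chunkVal buf i (bScan buf i) <<< (0 : Int).toNat)
          = chunkVal buf i (bScan buf i) := by
        rw [show (0 : Int).toNat = 0 from rfl, Int.shiftLeft_zero]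
        exact pvBorZeroLeft (chunkVal_nonneg _ _ _)
      rw [hx0] at hrc
      simp only [dvGo, read_uvarint, hrc, bGo]
      rw [if_neg (by omega : ¬ (bScan buf i + 1 - i = 0))]
      rw [if_neg (by omega : ¬ ((buf.length : Int) ≤ bScan buf i ∨ 10 ≤ bScan buf i - i))]
      rw [bAcc_zero buf i (bScan buf i) (by omega)]
      rw [show bScan buf i + 1 - i = bScan buf i - i + 1 from by ring]
      simp only [Option.getD_some, zigzag_decode]
      exact ih _ _
    · rw [if_neg hc] at hrc
      simp only [dvGo, read_uvarint, hrc, bGo]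
      rw [if_pos trivial, if_pos (by omega : (buf.length : Int) ≤ bScan buf i ∨ 10 ≤ bScan buf i - i)]

-- ===== VERDICT (by name: the statement is the Claim_ definition above) =====
theorem dump_varints_spec : Claim_equal_dump_varints := by
  intro buf pos count _ _
  unfold Spec_dump_varints dump_varints dump_varints_alt
  exact dvGo_eq_bGo buf count.toNat [] pos
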